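-- pv_equiv track=rewrite | github.com/jeeva2470041/agrisch | backend/add_new_schemes.py | _normalise_crops
-- ===== SOURCE A (Python) =====
-- def _normalise_crops(crops_list):
--     """Convert crop names to match our DB convention."""
--     crop_map = {
--         "All Crops": "All",
--         "All": "All",
--         "All Notified Crops": "All",
--         "Food Crops": "All",
--         "Agriculture": "All",
--     }
--     normalised = set()
--     for c in crops_list:
--         mapped = crop_map.get(c)
--         if mapped:
--             normalised.add(mapped)
--         else:
--             normalised.add(c)
--     # If "All" is present alongside specific crops, keep "All"
--     if "All" in normalised:
--         return ["All"]
--     return sorted(normalised)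
-- ===== SOURCE B (Python) =====
-- def _normalise_crops(crops_list):
--     """Convert crop names to match our DB convention."""
--     keys = {"All Crops", "All", "All Notified Crops", "Food Crops", "Agriculture"}
--     # Every crop_map value is "All", so A returns ["All"] exactly when some
--     # element is a map key.  Otherwise: sort first, then one scan removing
--     # adjacent duplicates (no set is ever built for the output).
--     out = []
--     prev = None
--     for c in sorted(crops_list):
--         if c in keys:
--             return ["All"]
--         if c != prev:
--             out.append(c)
--             prev = c
--     return out
-- ===== Notes on version B (the rewrite author's own statement) =====
-- stated objective: alternative
-- what changed: A builds a mapped set in one pass and then branches and sorts it; B sorts the raw list first and makes a single adjacent-duplicate-removing scan with an early return on any crop_map key (all map values are 'All'), never building a set for the output.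
import Mathlib
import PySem

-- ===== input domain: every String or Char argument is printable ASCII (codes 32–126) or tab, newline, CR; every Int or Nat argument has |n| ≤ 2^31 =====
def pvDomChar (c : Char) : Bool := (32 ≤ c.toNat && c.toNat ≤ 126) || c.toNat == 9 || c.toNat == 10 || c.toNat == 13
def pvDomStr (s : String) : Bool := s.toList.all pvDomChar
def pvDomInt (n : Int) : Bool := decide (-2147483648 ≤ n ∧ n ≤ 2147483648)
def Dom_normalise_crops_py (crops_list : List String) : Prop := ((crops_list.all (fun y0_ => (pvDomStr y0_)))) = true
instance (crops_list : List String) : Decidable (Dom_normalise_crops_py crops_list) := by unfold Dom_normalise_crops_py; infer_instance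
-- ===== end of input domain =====

-- B reorganises the work: sort first, then one adjacent-duplicate-removing scan with an
-- early return on any crop_map key (every map value is "All"); no set is built for the output.

-- ===== PORT A =====
-- crop_map of A, as a PySem.Dict built by literal inserts
def cropMap : PySem.Dict String String :=
  (((((PySem.Dict.empty.insert "All Crops" "All").insert "All" "All").insert
      "All Notified Crops" "All").insert "Food Crops" "All").insert "Agriculture" "All")

def normalise_crops_py (crops_list : List String) : List String :=
  let normalised : PySem.Set String :=
    crops_list.foldl (fun s c =>
      match cropMap.get? c with
      | some mapped => if mapped = "" then PySem.Set.add s c else PySem.Set.add s mapped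
      | none => PySem.Set.add s c) PySem.Set.empty
  if PySem.Set.contains normalised "All" then ["All"]
  else PySem.List.sorted normalised (fun x => x) false

-- ===== PORT B =====
def keyList : List String :=
  ["All Crops", "All", "All Notified Crops", "Food Crops", "Agriculture"]

-- the Python set literal `keys`
def cropKeySet : PySem.Set String := PySem.Set.ofList keyList

-- B's single loop over the sorted list: early return on a key, append when c ≠ prev
def altLoop (out : List String) (prev : Option String) : List String → List String
  | [] => out
  | c :: rest =>
      if PySem.Set.contains cropKeySet c then ["All"]
      else if some c ≠ prev then altLoop (out ++ [c]) (some c) rest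
      else altLoop out prev rest

def normalise_crops_py_alt (crops_list : List String) : List String :=
  altLoop [] none (PySem.List.sorted crops_list (fun x => x) false)

-- ===== PRECONDITION & SPEC =====
def Spec_normalise_crops_py (crops_list : List String) (out : List String) : Prop := out = normalise_crops_py_alt crops_list
instance (crops_list : List String) (out : List String) : Decidable (Spec_normalise_crops_py crops_list out) := by unfold Spec_normalise_crops_py; infer_instance

-- ===== CLAIM (what is proved, stated in full; the proofs are below) =====
def Claim_equal_normalise_crops_py : Prop := ∀ (crops_list : List String), Dom_normalise_crops_py crops_list → Spec_normalise_crops_py crops_list (normalise_crops_py crops_list)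

-- ===== LEMMAS AND PROOFS =====

-- cropMap's lookups: every key maps to "All", everything else misses
theorem get?_cropMap (c : String) :
    cropMap.get? c = if c ∈ keyList then some "All" else none := by
  simp only [cropMap, keyList, PySem.Dict.get?_insert, PySem.Dict.get?_empty, List.mem_cons,
    List.not_mem_nil, or_false]
  split_ifs <;> tauto

-- membership in the Python key set is membership in keyList
theorem contains_cropKeySet (c : String) :
    PySem.Set.contains cropKeySet c = true ↔ c ∈ keyList := by
  simp [cropKeySet, PySem.Set.contains, PySem.Set.mem_ofList]

theorem mem_cropKeySet (c : String) : c ∈ cropKeySet ↔ c ∈ keyList := by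
  simp [cropKeySet, PySem.Set.mem_ofList]

-- when no element of l is a key, A's loop is a plain Set.add loop
theorem loop_no_key (l : List String) (s : PySem.Set String)
    (h : ∀ c ∈ l, c ∉ keyList) :
    l.foldl (fun s c =>
      match cropMap.get? c with
      | some mapped => if mapped = "" then PySem.Set.add s c else PySem.Set.add s mapped
      | none => PySem.Set.add s c) s = l.foldl PySem.Set.add s := by
  induction l generalizing s with
  | nil => rfl
  | cons x xs ih =>
    have hx : cropMap.get? x = none := by
      rw [get?_cropMap]; simp [h x (by simp)]
    simp only [List.foldl_cons, hx]
    exact ih _ (fun c hc => h c (by simp [hc]))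

-- membership is preserved by A's loop
theorem loop_mono (l : List String) (s : PySem.Set String) (hA : "All" ∈ s) :
    "All" ∈ l.foldl (fun s c =>
      match cropMap.get? c with
      | some mapped => if mapped = "" then PySem.Set.add s c else PySem.Set.add s mapped
      | none => PySem.Set.add s c) s := by
  induction l generalizing s with
  | nil => exact hA
  | cons x xs ih =>
    simp only [List.foldl_cons]
    apply ih
    cases hg : cropMap.get? x with
    | none => simp [PySem.Set.mem_add, hA]
    | some m => by_cases hm : m = "" <;> simp [hm, PySem.Set.mem_add, hA]

-- when some element of l is a key, "All" ends up in A's set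
theorem loop_key (l : List String) (s : PySem.Set String)
    (h : ∃ c ∈ l, c ∈ keyList) :
    "All" ∈ l.foldl (fun s c =>
      match cropMap.get? c with
      | some mapped => if mapped = "" then PySem.Set.add s c else PySem.Set.add s mapped
      | none => PySem.Set.add s c) s := by
  induction l generalizing s with
  | nil => exact absurd h (by simp)
  | cons x xs ih =>
    simp only [List.foldl_cons]
    by_cases hx : x ∈ keyList
    · have hg : cropMap.get? x = some "All" := by rw [get?_cropMap]; simp [hx]
      apply loop_mono
      simp [hg, PySem.Set.mem_add]
    · obtain ⟨c, hc, hck⟩ := h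
      rcases List.mem_cons.mp hc with rfl | hcs
      · exact absurd hck hx
      · exact ih _ ⟨c, hcs, hck⟩

-- B's loop returns ["All"] as soon as any key occurs in the remaining list
theorem altLoop_key (l : List String) (out : List String) (prev : Option String)
    (h : ∃ c ∈ l, c ∈ keyList) :
    altLoop out prev l = ["All"] := by
  induction l generalizing out prev with
  | nil => exact absurd h (by simp)
  | cons x xs ih =>
    by_cases hx : x ∈ keyList
    · simp [altLoop, mem_cropKeySet, hx]
    · have hc : PySem.Set.contains cropKeySet x = false := by
        rw [Bool.eq_false_iff]; intro hh; exact hx ((contains_cropKeySet x).mp hh)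
      obtain ⟨c, hc', hck⟩ := h
      rcases List.mem_cons.mp hc' with rfl | hcs
      · exact absurd hck hx
      · simp only [altLoop, hc, Bool.false_eq_true, if_false]
        split_ifs <;> exact ih _ _ ⟨c, hcs, hck⟩

-- B's accumulator only prefixes the rest of the run (no key in l)
theorem altLoop_append (l : List String) (out : List String) (prev : Option String)
    (hk : ∀ c ∈ l, c ∉ keyList) :
    altLoop out prev l = out ++ altLoop [] prev l := by
  induction l generalizing out prev with
  | nil => simp [altLoop]
  | cons x xs ih =>
    have hc : PySem.Set.contains cropKeySet x = false := by
      rw [Bool.eq_false_iff]; intro hh; exact hk x (by simp) ((contains_cropKeySet x).mp hh)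
    have hk' : ∀ c ∈ xs, c ∉ keyList := fun c hcm => hk c (by simp [hcm])
    simp only [altLoop, hc, Bool.false_eq_true, if_false]
    split_ifs with hp
    · rw [List.nil_append, ih _ _ hk', ih [x] _ hk', List.append_assoc]
    · exact ih _ _ hk'

-- B's scan over a ≤-sorted key-free list: strictly increasing, keeps exactly the
-- elements different from prev, and stays above prev
theorem altLoop_spec (l : List String) (prev : Option String)
    (hl : l.Pairwise (· ≤ ·)) (hk : ∀ c ∈ l, c ∉ keyList)
    (hprev : ∀ p, prev = some p → ∀ c ∈ l, p ≤ c) :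
    (altLoop [] prev l).Pairwise (· < ·) ∧
    (∀ x, x ∈ altLoop [] prev l ↔ x ∈ l ∧ prev ≠ some x) ∧
    (∀ p, prev = some p → ∀ x ∈ altLoop [] prev l, p < x) := by
  induction l generalizing prev with
  | nil => simp [altLoop]
  | cons c rest ih =>
    have hc : PySem.Set.contains cropKeySet c = false := by
      rw [Bool.eq_false_iff]; intro hh; exact hk c (by simp) ((contains_cropKeySet c).mp hh)
    have hk' : ∀ x ∈ rest, x ∉ keyList := fun x hx => hk x (by simp [hx])
    have hle : ∀ x ∈ rest, c ≤ x := fun x hx => (List.pairwise_cons.mp hl).1 x hx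
    have hl' : rest.Pairwise (· ≤ ·) := (List.pairwise_cons.mp hl).2
    by_cases hp : some c ≠ prev
    · -- c is emitted
      have hrec := ih (some c) hl' hk'
        (by intro p hpp x hx; cases Option.some.inj hpp; exact hle x hx)
      obtain ⟨rpw, rmem, rgt⟩ := hrec
      have heq : altLoop [] prev (c :: rest) = c :: altLoop [] (some c) rest := by
        simp only [altLoop, hc, Bool.false_eq_true, if_false, if_pos hp, List.nil_append]
        rw [altLoop_append rest [c] (some c) hk']
        rfl
      rw [heq]
      refine ⟨?_, ?_, ?_⟩
      · exact List.pairwise_cons.mpr ⟨fun x hx => rgt c rfl x hx, rpw⟩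
      · intro x
        constructor
        · intro hx
          rcases List.mem_cons.mp hx with rfl | hx'
          · exact ⟨by simp, fun h => hp h.symm⟩
          · obtain ⟨hxr, hxc⟩ := (rmem x).mp hx'
            refine ⟨by simp [hxr], ?_⟩
            rintro rfl'
            -- prev = some x, x ∈ rest, x ≠ c; but prev's p ≤ c ≤ x forces x = c
            have hpx : x ≤ c := by
              have := hprev x rfl' c (by simp)
              exact this
            have hcx : c ≤ x := hle x hxr
            exact hxc (congrArg some (le_antisymm hcx hpx))
        · rintro ⟨hx, hxp⟩
          rcases List.mem_cons.mp hx with rfl | hx'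
          · exact List.mem_cons_self ..
          · by_cases hxc : x = c
            · subst hxc; exact List.mem_cons_self ..
            · exact List.mem_cons.mpr (Or.inr ((rmem x).mpr
                ⟨hx', fun h => hxc (Option.some.inj h).symm⟩))
      · rintro p rfl' x hx
        have hpc : p ≤ c := hprev p rfl' c (by simp)
        have hpc' : p ≠ c := fun h => hp (by rw [rfl', h])
        have hplt : p < c := lt_of_le_of_ne hpc hpc'
        rcases List.mem_cons.mp hx with rfl | hx'
        · exact hplt
        · exact lt_trans hplt (rgt c rfl x hx')
    · -- c equals prev, skipped
      push_neg at hp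
      subst hp
      have heq : altLoop [] (some c) (c :: rest) = altLoop [] (some c) rest := by
        simp only [altLoop, hc, Bool.false_eq_true, if_false]
        rw [if_neg (by simp)]
      rw [heq]
      have hrec := ih (some c) hl' hk'
        (by intro p hpp x hx; cases Option.some.inj hpp; exact hle x hx)
      obtain ⟨rpw, rmem, rgt⟩ := hrec
      refine ⟨rpw, ?_, rgt⟩
      intro x
      rw [rmem x]
      constructor
      · rintro ⟨hx, hxc⟩; exact ⟨by simp [hx], hxc⟩
      · rintro ⟨hx, hxc⟩
        rcases List.mem_cons.mp hx with rfl | hx'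
        · exact (hxc rfl).elim
        · exact ⟨hx', hxc⟩

-- ===== VERDICT (by name: the statement is the Claim_ definition above) =====
theorem normalise_crops_py_spec : Claim_equal_normalise_crops_py := by
  intro crops_list _
  unfold Spec_normalise_crops_py normalise_crops_py normalise_crops_py_alt
  by_cases hkey : ∃ c ∈ crops_list, c ∈ keyList
  · have hA := loop_key crops_list PySem.Set.empty hkey
    have hB : altLoop [] none (PySem.List.sorted crops_list (fun x => x) false) = ["All"] := by
      obtain ⟨c, hc, hck⟩ := hkey
      exact altLoop_key _ _ _ ⟨c, (PySem.List.mem_sorted ..).mpr hc, hck⟩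
    rw [hB, if_pos (by simpa using hA)]
  · push_neg at hkey
    have hloop := loop_no_key crops_list PySem.Set.empty hkey
    have hof : crops_list.foldl PySem.Set.add PySem.Set.empty = PySem.Set.ofList crops_list := by
      rw [PySem.Set.ofList_eq_foldl]; rfl
    have hnotin : "All" ∉ PySem.Set.ofList crops_list := by
      rw [PySem.Set.mem_ofList]
      intro hin
      exact hkey "All" hin (by simp [keyList])
    simp only [hloop, hof]
    rw [if_neg (by simpa using hnotin)]
    -- both sides are the strictly sorted list of the distinct elements
    have hs : (PySem.List.sorted crops_list (fun x => x) false).Pairwise (· ≤ ·) :=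
      PySem.List.sorted_pairwise ..
    have hks : ∀ c ∈ PySem.List.sorted crops_list (fun x => x) false, c ∉ keyList :=
      fun c hc => hkey c ((PySem.List.mem_sorted ..).mp hc)
    obtain ⟨rpw, rmem, -⟩ := altLoop_spec _ none hs hks (by intro p h; cases h)
    set r := altLoop [] none (PySem.List.sorted crops_list (fun x => x) false) with hr
    have hrmem : ∀ x, x ∈ r ↔ x ∈ crops_list := by
      intro x
      rw [rmem x, PySem.List.mem_sorted]
      simp
    have hrnodup : r.Nodup := rpw.imp ne_of_lt
    have hperm : r.Perm (PySem.Set.ofList crops_list) := by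
      rw [List.perm_ext_iff_of_nodup hrnodup (PySem.Set.nodup_ofList _)]
      intro a
      rw [hrmem a, PySem.Set.mem_ofList]
    exact PySem.List.sorted_eq_of_perm_of_pairwise_lt _ r (fun x => x) hperm rpw
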